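-- pv_equiv track=rewrite | github.com/Gaurav-Pande/AES | gender_age_models/feature_extraction.py | age_summary
-- ===== SOURCE A (Python) =====
-- def age_summary(essays, age, age_label, c13, c14, c15, c16, c1, c2):
--   for i in range(len(age)):
--     if age[i] == 13:
--       c13 += 1
--     elif age[i] == 14:
--       c14 += 1
--     elif age[i] == 15:
--       c15 += 1
--     elif age[i] == 16:
--       c16 += 1
--
--     if age_label[i] == 1:
--       c1 += 1
--     elif age_label[i] == 2:
--       c2 += 1
--   return c13, c14, c15, c16, c1, c2
-- ===== SOURCE B (Python) =====
-- def age_summary(essays, age, age_label, c13, c14, c15, c16, c1, c2):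
--     # Tally whole lists at once instead of a scalar-counter loop.
--     labels = age_label[:len(age)]
--     return (c13 + age.count(13), c14 + age.count(14),
--             c15 + age.count(15), c16 + age.count(16),
--             c1 + labels.count(1), c2 + labels.count(2))
-- ===== Notes on version B (the rewrite author's own statement) =====
-- stated objective: idiomatic
-- what changed: Replaces the indexed loop with scalar counters and an elif-chain by whole-list tallies via list.count over age and over age_label truncated to len(age).
import Mathlib
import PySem

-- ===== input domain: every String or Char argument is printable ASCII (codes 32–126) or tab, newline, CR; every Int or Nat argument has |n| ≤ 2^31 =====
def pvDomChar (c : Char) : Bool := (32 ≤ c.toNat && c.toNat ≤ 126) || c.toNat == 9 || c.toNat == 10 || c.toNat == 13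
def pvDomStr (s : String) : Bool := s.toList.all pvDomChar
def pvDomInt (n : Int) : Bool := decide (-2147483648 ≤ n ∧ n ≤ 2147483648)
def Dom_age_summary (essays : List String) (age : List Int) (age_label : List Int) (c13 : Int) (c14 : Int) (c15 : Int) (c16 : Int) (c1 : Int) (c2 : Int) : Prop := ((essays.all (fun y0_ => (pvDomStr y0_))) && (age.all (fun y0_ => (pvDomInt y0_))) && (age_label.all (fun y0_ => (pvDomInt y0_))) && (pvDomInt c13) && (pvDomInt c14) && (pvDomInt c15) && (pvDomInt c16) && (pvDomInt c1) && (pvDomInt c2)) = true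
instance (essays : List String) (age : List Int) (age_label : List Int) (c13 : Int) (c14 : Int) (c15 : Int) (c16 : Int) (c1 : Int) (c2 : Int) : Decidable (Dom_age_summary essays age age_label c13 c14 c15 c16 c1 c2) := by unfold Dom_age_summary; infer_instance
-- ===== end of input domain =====

-- B replaces the indexed loop with scalar counters by whole-list tallies (list.count over age
-- and over age_label truncated to len(age)) — an idiomatic restructuring, same cost.
-- ===== PORT A =====
-- A's 'for i in range(len(age))' indexes age and age_label in lockstep; ported as simultaneous
-- structural recursion over the two lists. When age_label is exhausted Python raises IndexError
-- (excluded by Pre_); the port uses headD 0 there, about which nothing is claimed.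
def ageLoopA : List Int → List Int → Int → Int → Int → Int → Int → Int → Int × Int × Int × Int × Int × Int
  | [], _, c13, c14, c15, c16, c1, c2 => (c13, c14, c15, c16, c1, c2)
  | x :: rest, ls, c13, c14, c15, c16, c1, c2 =>
    let (c13', c14', c15', c16') :=
      if x = 13 then (c13 + 1, c14, c15, c16)
      else if x = 14 then (c13, c14 + 1, c15, c16)
      else if x = 15 then (c13, c14, c15 + 1, c16)
      else if x = 16 then (c13, c14, c15, c16 + 1)
      else (c13, c14, c15, c16)
    let lab := ls.headD 0
    let (c1', c2') :=
      if lab = 1 then (c1 + 1, c2)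
      else if lab = 2 then (c1, c2 + 1)
      else (c1, c2)
    ageLoopA rest ls.tail c13' c14' c15' c16' c1' c2'

def age_summary (essays : List String) (age : List Int) (age_label : List Int) (c13 : Int) (c14 : Int) (c15 : Int) (c16 : Int) (c1 : Int) (c2 : Int) : Int × Int × Int × Int × Int × Int :=
  ageLoopA age age_label c13 c14 c15 c16 c1 c2

-- ===== PORT B =====
def age_summary_alt (essays : List String) (age : List Int) (age_label : List Int) (c13 : Int) (c14 : Int) (c15 : Int) (c16 : Int) (c1 : Int) (c2 : Int) : Int × Int × Int × Int × Int × Int :=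
  let labels := age_label.take age.length   -- age_label[:len(age)]
  (c13 + (age.count 13 : Int), c14 + (age.count 14 : Int),
   c15 + (age.count 15 : Int), c16 + (age.count 16 : Int),
   c1 + (labels.count 1 : Int), c2 + (labels.count 2 : Int))

-- ===== PRECONDITION & SPEC =====
-- A raises IndexError on age_label[i] when age_label is shorter than age; exactly those inputs are excluded.
def Pre_age_summary (essays : List String) (age : List Int) (age_label : List Int) (c13 : Int) (c14 : Int) (c15 : Int) (c16 : Int) (c1 : Int) (c2 : Int) : Prop :=
  age.length ≤ age_label.length
instance (essays : List String) (age : List Int) (age_label : List Int) (c13 : Int) (c14 : Int) (c15 : Int) (c16 : Int) (c1 : Int) (c2 : Int) : Decidable (Pre_age_summary essays age age_label c13 c14 c15 c16 c1 c2) := by unfold Pre_age_summary; infer_instance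

def pvWitness_age_summary : List String × List Int × List Int × Int × Int × Int × Int × Int × Int :=
  (["hi"], [13, 15, 20], [1, 2, 3], 0, 0, 0, 0, 0, 0)

def Spec_age_summary (essays : List String) (age : List Int) (age_label : List Int) (c13 : Int) (c14 : Int) (c15 : Int) (c16 : Int) (c1 : Int) (c2 : Int) (out : Int × Int × Int × Int × Int × Int) : Prop := out = age_summary_alt essays age age_label c13 c14 c15 c16 c1 c2
instance (essays : List String) (age : List Int) (age_label : List Int) (c13 : Int) (c14 : Int) (c15 : Int) (c16 : Int) (c1 : Int) (c2 : Int) (out : Int × Int × Int × Int × Int × Int) : Decidable (Spec_age_summary essays age age_label c13 c14 c15 c16 c1 c2 out) := by unfold Spec_age_summary; infer_instance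

-- ===== CLAIM (what is proved, stated in full; the proofs are below) =====
def Claim_equal_age_summary : Prop := ∀ (essays : List String) (age : List Int) (age_label : List Int) (c13 : Int) (c14 : Int) (c15 : Int) (c16 : Int) (c1 : Int) (c2 : Int), Dom_age_summary essays age age_label c13 c14 c15 c16 c1 c2 → Pre_age_summary essays age age_label c13 c14 c15 c16 c1 c2 → Spec_age_summary essays age age_label c13 c14 c15 c16 c1 c2 (age_summary essays age age_label c13 c14 c15 c16 c1 c2)

-- ===== LEMMAS AND PROOFS =====
-- Loop invariant: with enough labels, the loop result is the starting counters plus the tallies.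
set_option maxHeartbeats 1000000 in
lemma ageLoopA_eq (age ls : List Int) (c13 c14 c15 c16 c1 c2 : Int)
    (h : age.length ≤ ls.length) :
    ageLoopA age ls c13 c14 c15 c16 c1 c2 =
      (c13 + (age.count 13 : Int), c14 + (age.count 14 : Int),
       c15 + (age.count 15 : Int), c16 + (age.count 16 : Int),
       c1 + ((ls.take age.length).count 1 : Int), c2 + ((ls.take age.length).count 2 : Int)) := by
  induction age generalizing ls c13 c14 c15 c16 c1 c2 with
  | nil => simp [ageLoopA]
  | cons x rest ih =>
    cases ls with
    | nil => simp at h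
    | cons l ls' =>
      simp only [List.length_cons, Nat.add_le_add_iff_right] at h
      simp only [ageLoopA, List.headD, List.tail_cons]
      split_ifs <;>
        simp_all [ih _ _ _ _ _ _ _ h, List.count_cons, Prod.ext_iff] <;>
        push_cast <;> omega

-- ===== VERDICT (by name: the statement is the Claim_ definition above) =====
theorem age_summary_spec : Claim_equal_age_summary := by
  intro essays age age_label c13 c14 c15 c16 c1 c2 _ hpre
  unfold Spec_age_summary age_summary age_summary_alt
  exact ageLoopA_eq age age_label c13 c14 c15 c16 c1 c2 hpre
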